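-- pv_equiv track=rewrite | github.com/JacquesLucke/code_autocomplete | text_block.py | get_current_open_bracket_index
-- ===== SOURCE A (Python) =====
-- def get_current_open_bracket_index(text):
--     close_bracket_counter = 0
--     current_open_bracket_index = -1
--
--     for i, c in enumerate(reversed(text)):
--         if c == ")": close_bracket_counter += 1
--         elif c == "(":
--             if close_bracket_counter > 0: close_bracket_counter -= 1
--             else:
--                 current_open_bracket_index = len(text) - i
--                 break
--     return current_open_bracket_index
-- ===== SOURCE B (Python) =====
-- def get_current_open_bracket_index(text):
--     stack = []
--     for i, c in enumerate(text):
--         if c == "(":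
--             stack.append(i)
--         elif c == ")" and stack:
--             stack.pop()
--     return stack[-1] + 1 if stack else -1
-- ===== Notes on version B (the rewrite author's own statement) =====
-- stated objective: alternative
-- what changed: Replaced A's reverse scan with a close-bracket counter and break by a single forward pass that keeps a stack of indices of unmatched open brackets and returns top+1 (or -1 if the stack is empty).
import Mathlib
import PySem

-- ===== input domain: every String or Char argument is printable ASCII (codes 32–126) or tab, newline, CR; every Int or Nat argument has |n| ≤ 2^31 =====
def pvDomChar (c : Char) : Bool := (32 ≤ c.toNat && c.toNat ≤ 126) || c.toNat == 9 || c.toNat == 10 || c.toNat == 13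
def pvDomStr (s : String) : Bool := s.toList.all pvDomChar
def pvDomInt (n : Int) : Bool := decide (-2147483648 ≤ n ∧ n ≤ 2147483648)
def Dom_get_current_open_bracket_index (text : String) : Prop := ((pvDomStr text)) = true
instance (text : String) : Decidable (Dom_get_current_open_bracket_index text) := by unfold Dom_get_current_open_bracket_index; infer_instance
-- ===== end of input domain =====

-- B differs from A: a forward pass with a stack of indices of unmatched open brackets instead of A's reverse scan with a close-bracket counter and break.

-- ===== PORT A =====
-- A's loop over enumerate(reversed(text)): i = reverse index, k = close_bracket_counter;
-- 'break' with the assignment becomes returning (len - i) directly; falling off the loop returns -1.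
def pvALoop (len : Nat) (cs : List Char) (i : Nat) (k : Nat) : Int :=
  match cs with
  | [] => -1
  | c :: rest =>
    if c = ')' then pvALoop len rest (i+1) (k+1)
    else if c = '(' then
      (if k > 0 then pvALoop len rest (i+1) (k-1) else (len : Int) - (i : Int))
    else pvALoop len rest (i+1) k

def get_current_open_bracket_index (text : String) : Int :=
  pvALoop text.toList.length text.toList.reverse 0 0

-- ===== PORT B =====
-- B's forward loop over enumerate(text); the Python list used as a stack (append/pop at the end)
-- is transcribed with the top at the head (cons/tail); stack[-1] is the head.
def pvBLoop (cs : List Char) (i : Nat) (stack : List Nat) : List Nat :=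
  match cs with
  | [] => stack
  | c :: rest =>
    if c = '(' then pvBLoop rest (i+1) (i :: stack)
    else if c = ')' then pvBLoop rest (i+1) stack.tail
    else pvBLoop rest (i+1) stack

def get_current_open_bracket_index_alt (text : String) : Int :=
  match pvBLoop text.toList 0 [] with
  | t :: _ => (t : Int) + 1
  | [] => -1

-- ===== PRECONDITION & SPEC =====
def Spec_get_current_open_bracket_index (text : String) (out : Int) : Prop := out = get_current_open_bracket_index_alt text
instance (text : String) (out : Int) : Decidable (Spec_get_current_open_bracket_index text out) := by unfold Spec_get_current_open_bracket_index; infer_instance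

-- ===== CLAIM (what is proved, stated in full; the proofs are below) =====
def Claim_equal_get_current_open_bracket_index : Prop := ∀ (text : String), Dom_get_current_open_bracket_index text → Spec_get_current_open_bracket_index text (get_current_open_bracket_index text)

-- ===== LEMMAS AND PROOFS =====

-- Appending one character to the input applies one stack step at index i + zs.length.
theorem pvBLoop_append (zs : List Char) (c : Char) (i : Nat) (s : List Nat) :
    pvBLoop (zs ++ [c]) i s =
      (if c = '(' then (i + zs.length) :: pvBLoop zs i s
       else if c = ')' then (pvBLoop zs i s).tail
       else pvBLoop zs i s) := by
  induction zs generalizing i s with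
  | nil => simp [pvBLoop]
  | cons d rest ih =>
    have hidx : i + 1 + rest.length = i + (rest.length + 1) := by omega
    simp only [List.cons_append, pvBLoop]
    split_ifs with h1 h2 <;> rw [ih] <;> simp only [hidx, List.length_cons] <;> split_ifs <;> simp_all

-- Core invariant: A's reverse scan of a prefix ys with counter k equals B's stack of ys with k pops.
theorem pvKey (len : Nat) (ys : List Char) (k : Nat) (h : ys.length ≤ len) :
    pvALoop len ys.reverse (len - ys.length) k =
      (match (pvBLoop ys 0 []).drop k with
       | t :: _ => (t : Int) + 1
       | [] => -1) := by
  induction ys using List.reverseRecOn generalizing k with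
  | nil => simp [pvALoop, pvBLoop]
  | append_singleton zs c ih =>
    have hlen : zs.length + 1 ≤ len := by simpa using h
    have hz : zs.length ≤ len := by omega
    have hi : len - (zs ++ [c]).length + 1 = len - zs.length := by
      simp only [List.length_append, List.length_singleton]; omega
    rw [List.reverse_append]
    simp only [List.reverse_singleton, List.singleton_append, pvALoop, pvBLoop_append]
    by_cases hc : c = ')'
    · subst hc
      simp only [reduceIte, Char.reduceEq]
      rw [hi, ih (k+1) hz]
      have hdrop : ((pvBLoop zs 0 []).tail).drop k = (pvBLoop zs 0 []).drop (k+1) := by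
        rw [← List.drop_one, List.drop_drop, Nat.add_comm]
      simp [hdrop]
    · by_cases ho : c = '('
      · subst ho
        simp only [reduceIte, Char.reduceEq]
        by_cases hk : k > 0
        · rw [if_pos hk, hi, ih (k-1) hz]
          obtain ⟨k', rfl⟩ : ∃ k', k = k' + 1 := ⟨k - 1, by omega⟩
          simp
        · rw [if_neg hk]
          have hk0 : k = 0 := by omega
          subst hk0
          simp only [List.drop_zero, List.length_append, List.length_singleton]
          have hcast : (len : Int) - ((len - (zs.length + 1) : Nat) : Int) = (zs.length : Int) + 1 := by
            omega
          simp [hcast]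
      · rw [if_neg hc, if_neg ho, if_neg ho, if_neg hc, hi, ih k hz]

-- ===== VERDICT (by name: the statement is the Claim_ definition above) =====
theorem get_current_open_bracket_index_spec : Claim_equal_get_current_open_bracket_index := by
  intro text _
  unfold Spec_get_current_open_bracket_index get_current_open_bracket_index
    get_current_open_bracket_index_alt
  have := pvKey text.toList.length text.toList 0 (le_refl _)
  simpa using this
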